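-- pv_equiv track=rewrite | github.com/Lautiim/ayed1-2025-tps | TP4/Ejercicio_07.py | eliminar_subcadena_sin_rebanadas
-- ===== SOURCE A (Python) =====
-- def eliminar_subcadena_sin_rebanadas(cadena: str, posicion: int, cantidad: int) -> str:
--     """Función para eliminar una subcadena sin utilizar rebanadas
--
--     Pre: Recibe una cadena de caracteres, la posición inicial y la cantidad de caracteres a eliminar
--
--     Post: Devuelve la cadena resultante tras eliminar la subcadena
--     """
--     assert isinstance(cadena, str), "La entrada debe ser una cadena de caracteres"
--     assert (
--         isinstance(posicion, int) and posicion >= 0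
--     ), "La posición debe ser un entero no negativo"
--     assert (
--         isinstance(cantidad, int) and cantidad >= 0
--     ), "La cantidad debe ser un entero no negativo"
--
--     resultado = ""  # Inicializamos el resultado vacío
--     longitud_cadena = len(cadena)  # Obtenemos la longitud de la cadena original
--
--     for i in range(longitud_cadena):  # Recorremos cada índice de la cadena original
--         if i < posicion or i >= posicion + cantidad:
--             # Si el índice está fuera del rango de la subcadena a eliminar
--             resultado += cadena[i]  # Añadimos el carácter a la cadena resultante
--
--     return resultado
-- ===== SOURCE B (Python) =====
-- def eliminar_subcadena_sin_rebanadas(cadena: str, posicion: int, cantidad: int) -> str: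
--     """Devuelve la cadena sin los `cantidad` caracteres desde `posicion` (dos rebanadas)."""
--     assert isinstance(cadena, str), "La entrada debe ser una cadena de caracteres"
--     assert (
--         isinstance(posicion, int) and posicion >= 0
--     ), "La posición debe ser un entero no negativo"
--     assert (
--         isinstance(cantidad, int) and cantidad >= 0
--     ), "La cantidad debe ser un entero no negativo"
--
--     return cadena[:posicion] + cadena[posicion + cantidad:]
-- ===== Notes on version B (the rewrite author's own statement) =====
-- stated objective: simpler
-- what changed: Replaces the per-character index loop with the concatenation of two slices, cadena[:posicion] + cadena[posicion+cantidad:], computed by direct index arithmetic.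
import Mathlib
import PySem

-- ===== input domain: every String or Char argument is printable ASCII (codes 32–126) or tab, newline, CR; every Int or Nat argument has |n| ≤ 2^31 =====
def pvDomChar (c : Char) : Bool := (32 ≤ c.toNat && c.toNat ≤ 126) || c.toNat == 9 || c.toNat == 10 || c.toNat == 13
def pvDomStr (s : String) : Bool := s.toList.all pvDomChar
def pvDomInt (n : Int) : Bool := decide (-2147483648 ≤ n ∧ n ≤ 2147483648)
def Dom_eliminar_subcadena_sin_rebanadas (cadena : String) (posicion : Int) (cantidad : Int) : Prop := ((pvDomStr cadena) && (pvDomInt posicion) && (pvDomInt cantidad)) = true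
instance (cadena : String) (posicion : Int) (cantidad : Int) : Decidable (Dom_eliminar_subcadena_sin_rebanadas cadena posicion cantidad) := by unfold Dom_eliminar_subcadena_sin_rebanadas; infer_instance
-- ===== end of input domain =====

-- B replaces A's per-character index loop by the concatenation of two slices
-- (cadena[:posicion] + cadena[posicion+cantidad:]): simpler, same return value.


-- ===== PORT A =====
-- literal port of A: walk every index i of the string, appending cadena[i]
-- whenever i < posicion or i >= posicion + cantidad (the index is always in
-- range, so pyGetD with a dummy default is exact).
def eliminar_subcadena_sin_rebanadas (cadena : String) (posicion : Int) (cantidad : Int) : String :=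
  let cs := cadena.toList
  let longitud_cadena : Int := (cs.length : Int)
  let resultado : List Char :=
    (PySem.List.pyRange 0 longitud_cadena).foldl
      (fun acc i =>
        if decide (i < posicion) || decide (posicion + cantidad ≤ i) then
          acc ++ [PySem.List.pyGetD cs i ' ']
        else acc) []
  String.mk resultado

-- ===== PORT B =====
-- literal port of B: cadena[:posicion] ++ cadena[posicion+cantidad:]
def eliminar_subcadena_sin_rebanadas_alt (cadena : String) (posicion : Int) (cantidad : Int) : String :=
  String.mk (PySem.List.slice cadena.toList none (some posicion) ++
             PySem.List.slice cadena.toList (some (posicion + cantidad)) none)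

-- ===== PRECONDITION & SPEC =====
-- A (and B) assert posicion >= 0 and cantidad >= 0 and raise AssertionError otherwise.
def Pre_eliminar_subcadena_sin_rebanadas (cadena : String) (posicion : Int) (cantidad : Int) : Prop :=
  0 ≤ posicion ∧ 0 ≤ cantidad
instance (cadena : String) (posicion : Int) (cantidad : Int) : Decidable (Pre_eliminar_subcadena_sin_rebanadas cadena posicion cantidad) := by unfold Pre_eliminar_subcadena_sin_rebanadas; infer_instance

def pvWitness_eliminar_subcadena_sin_rebanadas : String × Int × Int := ("hola mundo", 2, 3)

def Spec_eliminar_subcadena_sin_rebanadas (cadena : String) (posicion : Int) (cantidad : Int) (out : String) : Prop := out = eliminar_subcadena_sin_rebanadas_alt cadena posicion cantidad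
instance (cadena : String) (posicion : Int) (cantidad : Int) (out : String) : Decidable (Spec_eliminar_subcadena_sin_rebanadas cadena posicion cantidad out) := by unfold Spec_eliminar_subcadena_sin_rebanadas; infer_instance

-- ===== CLAIM (what is proved, stated in full; the proofs are below) =====
def Claim_equal_eliminar_subcadena_sin_rebanadas : Prop := ∀ (cadena : String) (posicion : Int) (cantidad : Int), Dom_eliminar_subcadena_sin_rebanadas cadena posicion cantidad → Pre_eliminar_subcadena_sin_rebanadas cadena posicion cantidad → Spec_eliminar_subcadena_sin_rebanadas cadena posicion cantidad (eliminar_subcadena_sin_rebanadas cadena posicion cantidad)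

-- ===== LEMMAS AND PROOFS =====

-- The filtered index walk over the first n characters produces exactly
-- take a ++ drop (a+b) of those n characters.
theorem pv_key (cs : List Char) (d : Char) (a b : Nat) :
    ∀ n : Nat, n ≤ cs.length →
      (((List.range n).map (fun k : Nat => (k : Int))).filter
          (fun i => decide (i < (a : Int)) || decide ((a : Int) + (b : Int) ≤ i))).map
          (fun i => PySem.List.pyGetD cs i d)
        = (cs.take n).take a ++ (cs.take n).drop (a + b) := by
  intro n
  induction n with
  | zero => intro _; simp
  | succ n ih =>
    intro hn
    have hn' : n ≤ cs.length := Nat.le_of_succ_le hn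
    have hlt : n < cs.length := hn
    rw [List.range_succ, List.map_append, List.filter_append, List.map_append, ih hn']
    simp only [List.map_singleton]
    have hget : PySem.List.pyGetD cs (n : Int) d = cs[n] := by
      rw [PySem.List.pyGetD_natCast]
      simp [List.getD_eq_getElem?_getD, hlt]
    have htake : cs.take (n + 1) = cs.take n ++ [cs[n]] :=
      List.take_succ_eq_append_getElem hlt
    have hlen : (cs.take n).length = n := by simp [hn']
    by_cases h1 : n < a
    · have hfilter : (List.filter
          (fun i => decide (i < (a : Int)) || decide ((a : Int) + (b : Int) ≤ i)) [(n : Int)])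
          = [(n : Int)] := by
        simp only [List.filter_singleton]
        have : ((n : Int) < (a : Int)) := by exact_mod_cast h1
        simp [this]
      have e1 : (cs.take n).take a = cs.take n := List.take_of_length_le (by omega)
      have e2 : (cs.take (n + 1)).take a = cs.take (n + 1) :=
        List.take_of_length_le (by rw [htake]; simp; omega)
      have e3 : (cs.take n).drop (a + b) = [] := List.drop_eq_nil_of_le (by omega)
      have e4 : (cs.take (n + 1)).drop (a + b) = [] :=
        List.drop_eq_nil_of_le (by rw [htake]; simp; omega)
      rw [hfilter, List.map_singleton, hget, e1, e2, e3, e4, htake]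
      simp
    · by_cases h2 : n < a + b
      · have hfilter : (List.filter
            (fun i => decide (i < (a : Int)) || decide ((a : Int) + (b : Int) ≤ i)) [(n : Int)])
            = [] := by
          simp only [List.filter_singleton]
          have hA : ¬ ((n : Int) < (a : Int)) := by omega
          have hB : ¬ ((a : Int) + (b : Int) ≤ (n : Int)) := by omega
          simp [hA, hB]
        have e1 : (cs.take (n + 1)).take a = (cs.take n).take a := by
          rw [htake, List.take_append_of_le_length (by omega)]
        have e3 : (cs.take n).drop (a + b) = [] := List.drop_eq_nil_of_le (by omega)
        have e4 : (cs.take (n + 1)).drop (a + b) = [] :=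
          List.drop_eq_nil_of_le (by rw [htake]; simp; omega)
        rw [hfilter, e1, e3, e4]
        simp
      · have hfilter : (List.filter
            (fun i => decide (i < (a : Int)) || decide ((a : Int) + (b : Int) ≤ i)) [(n : Int)])
            = [(n : Int)] := by
          simp only [List.filter_singleton]
          have : ((a : Int) + (b : Int) ≤ (n : Int)) := by omega
          simp [this]
        have e1 : (cs.take (n + 1)).take a = (cs.take n).take a := by
          rw [htake, List.take_append_of_le_length (by omega)]
        have e4 : (cs.take (n + 1)).drop (a + b) = (cs.take n).drop (a + b) ++ [cs[n]] := by
          rw [htake, List.drop_append_of_le_length (by omega)]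
        rw [hfilter, List.map_singleton, hget, e1, e4, List.append_assoc]

-- ===== VERDICT (by name: the statement is the Claim_ definition above) =====
theorem eliminar_subcadena_sin_rebanadas_spec : Claim_equal_eliminar_subcadena_sin_rebanadas := by
  intro cadena posicion cantidad _ hpre
  obtain ⟨hp, hq⟩ := hpre
  unfold Spec_eliminar_subcadena_sin_rebanadas
  unfold eliminar_subcadena_sin_rebanadas eliminar_subcadena_sin_rebanadas_alt
  obtain ⟨a, rfl⟩ := Int.eq_ofNat_of_zero_le hp
  obtain ⟨b, rfl⟩ := Int.eq_ofNat_of_zero_le hq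
  set cs := cadena.toList with hcs
  simp only []
  congr 1
  rw [PySem.List.foldl_append_if
        (p := fun i => decide (i < (a : Int)) || decide ((a : Int) + (b : Int) ≤ i))
        (f := fun i => PySem.List.pyGetD cs i ' '),
      PySem.List.pyRange_zero_natCast, List.nil_append]
  have hkey := pv_key cs ' ' a b cs.length (le_refl _)
  simp only [List.take_length] at hkey
  rw [PySem.List.slice_to cs (b := (a : Int)) (Int.natCast_nonneg a),
      PySem.List.slice_from cs (a := (a : Int) + (b : Int)) (by positivity)]
  have hcast : ((a : Int) + (b : Int)).toNat = a + b := by omega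
  rw [hcast]
  exact hkey
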